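-- pv_equiv track=rewrite | github.com/chaiminwoo0223/Programmers | Algorithm/chap05/program01.py | solution
-- ===== SOURCE A (Python) =====
-- def solution(answers):
--     answer = []
--
--     one = [1, 2, 3, 4, 5]
--     two = [2, 1, 2, 3, 2, 4, 2, 5]
--     three = [3, 3, 1, 1, 2, 2, 4, 4, 5, 5]
--
--     one_counter = 0
--     two_counter = 0
--     three_counter = 0
--
--     for i in range(len(answers)):
--         if answers[i] == one[i % len(one)]:
--             one_counter += 1
--         if answers[i] == two[i % len(two)]:
--             two_counter += 1
--         if answers[i] == three[i % len(three)]: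
--             three_counter += 1
--
--     # 세 값 비교
--     max_counter = max(one_counter, two_counter, three_counter)
--     if max_counter == one_counter:
--         answer.append(1)
--     if max_counter == two_counter:
--         answer.append(2)
--     if max_counter == three_counter:
--         answer.append(3)
--
--     return answer
-- ===== SOURCE B (Python) =====
-- def solution(answers):
--     patterns = [
--         [1, 2, 3, 4, 5],
--         [2, 1, 2, 3, 2, 4, 2, 5],
--         [3, 3, 1, 1, 2, 2, 4, 4, 5, 5],
--     ]
--     # All three patterns repeat with a combined period of 40, so one histogram
--     # of (position mod 40, answer) determines every score with 40 lookups each.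
--     freq = {}
--     for i, a in enumerate(answers):
--         key = (i % 40, a)
--         freq[key] = freq.get(key, 0) + 1
--     scores = [sum(freq.get((r, p[r % len(p)]), 0) for r in range(40))
--               for p in patterns]
--     m = max(scores)
--     return [k for k in [1, 2, 3] if scores[k - 1] == m]
-- ===== Notes on version B (the rewrite author's own statement) =====
-- stated objective: alternative
-- what changed: A compares every answer against all three patterns in one interleaved loop with three counters; B never compares answers to patterns while scanning: it builds a histogram keyed by (position mod 40, answer) -- 40 being the patterns' common period -- and derives each score as a sum of 40 histogram lookups, then selects by max-and-filter.
import Mathlib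
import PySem

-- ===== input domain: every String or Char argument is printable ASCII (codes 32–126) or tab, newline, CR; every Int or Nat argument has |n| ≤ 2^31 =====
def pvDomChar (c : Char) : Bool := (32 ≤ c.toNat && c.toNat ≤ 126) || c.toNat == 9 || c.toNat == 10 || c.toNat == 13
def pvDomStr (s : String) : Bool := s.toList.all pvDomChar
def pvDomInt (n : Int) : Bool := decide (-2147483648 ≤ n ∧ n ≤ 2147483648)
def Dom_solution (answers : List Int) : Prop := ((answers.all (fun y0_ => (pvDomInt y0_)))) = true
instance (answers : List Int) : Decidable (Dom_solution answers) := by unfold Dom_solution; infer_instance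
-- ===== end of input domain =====

-- B never compares answers against the patterns while scanning: it builds one histogram keyed by
-- (position mod 40, answer) — 40 is the patterns' common period — and each score is a sum of 40
-- histogram lookups; selection is a uniform max-and-filter (alternative algorithm, same cost).

-- ===== PORT A =====
def solution (answers : List Int) : List Int :=
  let one : List Int := [1, 2, 3, 4, 5]
  let two : List Int := [2, 1, 2, 3, 2, 4, 2, 5]
  let three : List Int := [3, 3, 1, 1, 2, 2, 4, 4, 5, 5]
  let c := (PySem.List.pyRange 0 (answers.length : Int) 1).foldl
    (fun (c : Int × Int × Int) i =>
      ( if PySem.List.pyGetD answers i 0 = PySem.List.pyGetD one (PySem.Int.mod i (one.length : Int)) 0 then c.1 + 1 else c.1,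
        if PySem.List.pyGetD answers i 0 = PySem.List.pyGetD two (PySem.Int.mod i (two.length : Int)) 0 then c.2.1 + 1 else c.2.1,
        if PySem.List.pyGetD answers i 0 = PySem.List.pyGetD three (PySem.Int.mod i (three.length : Int)) 0 then c.2.2 + 1 else c.2.2))
    (0, 0, 0)
  let maxCounter := max c.1 (max c.2.1 c.2.2)
  ((if maxCounter = c.1 then [(1 : Int)] else []) ++
   (if maxCounter = c.2.1 then [(2 : Int)] else []) ++
   (if maxCounter = c.2.2 then [(3 : Int)] else []))

-- ===== PORT B =====
def pvPatterns : List (List Int) :=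
  [[1, 2, 3, 4, 5], [2, 1, 2, 3, 2, 4, 2, 5], [3, 3, 1, 1, 2, 2, 4, 4, 5, 5]]

-- for i, a in enumerate(answers): key = (i % 40, a); freq[key] = freq.get(key, 0) + 1
def pvFreq (answers : List Int) : PySem.Dict (Int × Int) Int :=
  (PySem.List.enumerate answers 0).foldl
    (fun d ia =>
      d.insert (PySem.Int.mod ia.1 40, ia.2) (d.getD (PySem.Int.mod ia.1 40, ia.2) 0 + 1))
    PySem.Dict.empty

-- sum(freq.get((r, p[r % len(p)]), 0) for r in range(40))
def pvScore (freq : PySem.Dict (Int × Int) Int) (p : List Int) : Int :=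
  (PySem.List.pyRange 0 40 1).foldl
    (fun s r => s + freq.getD (r, PySem.List.pyGetD p (PySem.Int.mod r (p.length : Int)) 0) 0) 0

def solution_alt (answers : List Int) : List Int :=
  let freq := pvFreq answers
  let scores := pvPatterns.map (fun p => pvScore freq p)
  let m := (PySem.List.max? scores (fun s => s)).getD 0
  ([1, 2, 3] : List Int).filter (fun k => PySem.List.pyGetD scores (k - 1) 0 == m)

-- ===== PRECONDITION & SPEC =====
def Spec_solution (answers : List Int) (out : List Int) : Prop := out = solution_alt answers
instance (answers : List Int) (out : List Int) : Decidable (Spec_solution answers out) := by unfold Spec_solution; infer_instance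

-- ===== CLAIM (what is proved, stated in full; the proofs are below) =====
def Claim_equal_solution : Prop := ∀ (answers : List Int), Dom_solution answers → Spec_solution answers (solution answers)

-- ===== LEMMAS AND PROOFS =====

-- A's interleaved three-counter fold is the triple of three independent counts.
theorem tripleFold (p1 p2 p3 : Int → Prop) [DecidablePred p1] [DecidablePred p2] [DecidablePred p3]
    (l : List Int) : ∀ c1 c2 c3 : Int,
    l.foldl (fun (c : Int × Int × Int) i =>
        (if p1 i then c.1 + 1 else c.1,
         if p2 i then c.2.1 + 1 else c.2.1,
         if p3 i then c.2.2 + 1 else c.2.2)) (c1, c2, c3)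
    = (c1 + l.countP (fun i => decide (p1 i)),
       c2 + l.countP (fun i => decide (p2 i)),
       c3 + l.countP (fun i => decide (p3 i))) := by
  induction l with
  | nil => simp
  | cons x t ih =>
      intro c1 c2 c3
      simp only [List.foldl_cons, List.countP_cons, ih]
      split_ifs <;> (simp_all [Prod.ext_iff]; try omega)

-- Σ over a nodup list of the indicator [(r, f r) = (x, a)] is the single indicator [a = f x].
theorem sum_indicator_zero (f : Int → Int) (x a : Int) (L : List Int) (hx : x ∉ L) :
    (L.map (fun r => if ((r, f r) : Int × Int) = (x, a) then (1 : Int) else 0)).sum = 0 := by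
  apply List.sum_eq_zero
  intro y hy
  simp only [List.mem_map] at hy
  obtain ⟨r, hr, hrel⟩ := hy
  by_cases h : ((r, f r) : Int × Int) = (x, a)
  · have hrx : r = x := by have := congrArg Prod.fst h; simpa using this
    exact absurd (hrx ▸ hr) hx
  · simp [h] at hrel; omega

theorem sum_indicator (f : Int → Int) (x a : Int) (L : List Int) (hnd : L.Nodup) (hx : x ∈ L) :
    (L.map (fun r => if ((r, f r) : Int × Int) = (x, a) then (1 : Int) else 0)).sum
      = if a = f x then 1 else 0 := by
  induction L with
  | nil => cases hx
  | cons y t ih =>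
      rcases List.nodup_cons.mp hnd with ⟨hyt, hndt⟩
      by_cases hxy : x = y
      · subst hxy
        simp only [List.map_cons, List.sum_cons, sum_indicator_zero f x a t hyt, add_zero]
        by_cases h : a = f x
        · simp [h]
        · have h' : ¬ f x = a := fun hfx => h hfx.symm
          simp [Prod.ext_iff, h, h']
      · have hxt : x ∈ t := by rcases List.mem_cons.mp hx with h | h; exact absurd h hxy; exact h
        simp only [List.map_cons, List.sum_cons, ih hndt hxt]
        have : ¬ ((y, f y) : Int × Int) = (x, a) := by simp [Prod.ext_iff]; intro h; exact absurd h.symm hxy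
        simp [this]

-- Core counting: summing histogram entries over one full period r ∈ [0,40) recovers the match count.
theorem hist_count (f : Int → Int) (l : List (Int × Int)) (hpos : ∀ p ∈ l, 0 ≤ p.1) :
    ((PySem.List.pyRange 0 40 1).map
        (fun r => ((l.map (fun ia => ((PySem.Int.mod ia.1 40, ia.2) : Int × Int))).count (r, f r) : Int))).sum
      = (l.countP (fun ia => ia.2 == f (PySem.Int.mod ia.1 40)) : Int) := by
  induction l with
  | nil => simp
  | cons p t ih =>
      have h0 : 0 ≤ p.1 := hpos p (List.mem_cons_self ..)
      have ht := ih (fun q hq => hpos q (List.mem_cons_of_mem _ hq))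
      have hmod : PySem.Int.mod p.1 40 = p.1 % 40 := PySem.Int.mod_eq_emod_of_pos (by omega)
      have hmem : PySem.Int.mod p.1 40 ∈ PySem.List.pyRange 0 40 1 := by
        rw [PySem.List.mem_pyRange_one, hmod]
        exact ⟨Int.emod_nonneg _ (by omega), Int.emod_lt_of_pos _ (by omega)⟩
      have hcount : ∀ r : Int,
          (((p :: t).map (fun ia => ((PySem.Int.mod ia.1 40, ia.2) : Int × Int))).count (r, f r) : Int)
            = ((t.map (fun ia => ((PySem.Int.mod ia.1 40, ia.2) : Int × Int))).count (r, f r) : Int)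
              + (if ((r, f r) : Int × Int) = (PySem.Int.mod p.1 40, p.2) then 1 else 0) := by
        intro r
        rw [List.map_cons, List.count_cons]
        simp only [beq_iff_eq]
        rcases eq_or_ne ((PySem.Int.mod p.1 40, p.2) : Int × Int) ((r, f r) : Int × Int) with h | h
        · rw [if_pos h, if_pos h.symm]; push_cast; ring
        · rw [if_neg h, if_neg (Ne.symm h)]; push_cast; ring
      calc ((PySem.List.pyRange 0 40 1).map
              (fun r => (((p :: t).map (fun ia => ((PySem.Int.mod ia.1 40, ia.2) : Int × Int))).count (r, f r) : Int))).sum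
          = ((PySem.List.pyRange 0 40 1).map
              (fun r => ((t.map (fun ia => ((PySem.Int.mod ia.1 40, ia.2) : Int × Int))).count (r, f r) : Int)
                + (if ((r, f r) : Int × Int) = (PySem.Int.mod p.1 40, p.2) then 1 else 0))).sum := by
            exact congrArg List.sum (List.map_congr_left (fun r _ => hcount r))
        _ = (t.countP (fun ia => ia.2 == f (PySem.Int.mod ia.1 40)) : Int)
              + (if p.2 = f (PySem.Int.mod p.1 40) then 1 else 0) := by
            rw [PySem.List.sum_map_add_int, ht,
              sum_indicator f (PySem.Int.mod p.1 40) p.2 _ (PySem.List.nodup_pyRange_one 0 40) hmem]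
        _ = ((p :: t).countP (fun ia => ia.2 == f (PySem.Int.mod ia.1 40)) : Int) := by
            rw [List.countP_cons]
            rcases eq_or_ne p.2 (f (PySem.Int.mod p.1 40)) with h | h
            · simp only [h, beq_self_eq_true, if_pos trivial]
              push_cast; ring
            · simp [h]

-- B's histogram is the counter of the residue-keyed pairs.
theorem pvFreq_eq (answers : List Int) :
    pvFreq answers
      = PySem.Dict.counter ((PySem.List.enumerate answers 0).map
          (fun ia => ((PySem.Int.mod ia.1 40, ia.2) : Int × Int))) := by
  unfold pvFreq
  rw [← PySem.Dict.foldl_insert_getD_add_one_eq_counter, List.foldl_map]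

-- B's score for a pattern equals A's match count for that pattern.
theorem pvScore_eq (answers p : List Int) (hlen : 0 < p.length) (hdvd : (p.length : Int) ∣ 40) :
    pvScore (pvFreq answers) p
      = ((PySem.List.pyRange 0 (answers.length : Int) 1).countP
          (fun i => PySem.List.pyGetD answers i 0
              == PySem.List.pyGetD p (PySem.Int.mod i (p.length : Int)) 0) : Int) := by
  unfold pvScore
  rw [PySem.List.foldl_add
      (g := fun r => (pvFreq answers).getD (r, PySem.List.pyGetD p (PySem.Int.mod r (p.length : Int)) 0) 0),
    zero_add, pvFreq_eq]
  have hgetD : ∀ r : Int,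
      (PySem.Dict.counter ((PySem.List.enumerate answers 0).map
          (fun ia => ((PySem.Int.mod ia.1 40, ia.2) : Int × Int)))).getD
        (r, PySem.List.pyGetD p (PySem.Int.mod r (p.length : Int)) 0) 0
      = (((PySem.List.enumerate answers 0).map
          (fun ia => ((PySem.Int.mod ia.1 40, ia.2) : Int × Int))).count
            (r, PySem.List.pyGetD p (PySem.Int.mod r (p.length : Int)) 0) : Int) := by
    intro r; exact PySem.Dict.getD_counter ..
  rw [List.map_congr_left (fun r _ => hgetD r)]
  rw [hist_count (fun r => PySem.List.pyGetD p (PySem.Int.mod r (p.length : Int)) 0)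
      (PySem.List.enumerate answers 0)
      (by
        intro q hq
        rcases (PySem.List.mem_enumerate_iff _ _ _).mp hq with ⟨k, hk, hq⟩
        simp [hq])]
  rw [PySem.List.enumerate_eq_map_pyRange (d := 0), List.countP_map]
  apply congrArg
  apply List.countP_congr
  intro i hi
  have h0 : 0 ≤ i := ((PySem.List.mem_pyRange_one).mp hi).1
  have hlp : (0 : Int) < (p.length : Int) := by exact_mod_cast hlen
  simp only [Function.comp_def]
  have hmm : PySem.Int.mod (PySem.Int.mod i 40) (p.length : Int) = PySem.Int.mod i (p.length : Int) := by
    rw [PySem.Int.mod_eq_emod_of_pos hlp, PySem.Int.mod_eq_emod_of_pos hlp,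
      PySem.Int.mod_eq_emod_of_pos (by omega : (0:Int) < 40)]
    exact Int.emod_emod_of_dvd i hdvd
  rw [hmm]

-- A's three hand-written append branches are B's filter over [1,2,3] with list-indexed scores.
theorem sel (s1 s2 s3 : Int) :
    ((if max s1 (max s2 s3) = s1 then [(1 : Int)] else []) ++
     (if max s1 (max s2 s3) = s2 then [(2 : Int)] else []) ++
     (if max s1 (max s2 s3) = s3 then [(3 : Int)] else []))
    = ([1, 2, 3] : List Int).filter
        (fun k => PySem.List.pyGetD [s1, s2, s3] (k - 1) 0
            == (PySem.List.max? [s1, s2, s3] (fun s => s)).getD 0) := by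
  have hm : max (max s1 s2) s3 = max s1 (max s2 s3) := max_assoc s1 s2 s3
  have hor : max s1 (max s2 s3) = s1 ∨ max s1 (max s2 s3) = s2 ∨ max s1 (max s2 s3) = s3 := by
    rcases max_choice s1 (max s2 s3) with h | h
    · exact Or.inl h
    · rcases max_choice s2 s3 with h' | h'
      · exact Or.inr (Or.inl (h.trans h'))
      · exact Or.inr (Or.inr (h.trans h'))
  have h1 : s1 ≤ max s1 (max s2 s3) := le_max_left _ _
  have h2 : s2 ≤ max s1 (max s2 s3) := le_trans (le_max_left _ _) (le_max_right _ _)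
  have h3 : s3 ≤ max s1 (max s2 s3) := le_trans (le_max_right _ _) (le_max_right _ _)
  rw [show (PySem.List.max? [s1, s2, s3] (fun s => s)) = some (max s1 (max s2 s3)) by
        rw [PySem.List.max?_id_cons]; simp [hm]]
  generalize hg : max s1 (max s2 s3) = m at hor h1 h2 h3 ⊢
  have e1 : PySem.List.pyGetD [s1, s2, s3] ((1 : Int) - 1) 0 = s1 := by
    norm_num [PySem.List.pyGetD, PySem.List.pyGet?, PySem.List.pyIdx?]
  have e2 : PySem.List.pyGetD [s1, s2, s3] ((2 : Int) - 1) 0 = s2 := by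
    norm_num [PySem.List.pyGetD, PySem.List.pyGet?, PySem.List.pyIdx?]
  have e3 : PySem.List.pyGetD [s1, s2, s3] ((3 : Int) - 1) 0 = s3 := by
    norm_num [PySem.List.pyGetD, PySem.List.pyGet?, PySem.List.pyIdx?]
    rfl
  simp only [Option.getD_some, List.filter_cons, List.filter_nil, e1, e2, e3, beq_iff_eq]
  clear hm hg e1 e2 e3
  rcases hor with h | h | h <;> subst h <;> split_ifs <;> first | (exfalso; omega) | rfl

-- ===== VERDICT (by name: the statement is the Claim_ definition above) =====
theorem solution_spec : Claim_equal_solution := by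
  intro answers _
  show solution answers = solution_alt answers
  unfold solution solution_alt pvPatterns
  simp only [List.map_cons, List.map_nil]
  rw [tripleFold
    (fun i => PySem.List.pyGetD answers i 0 =
      PySem.List.pyGetD [1, 2, 3, 4, 5] (PySem.Int.mod i (([1, 2, 3, 4, 5] : List Int).length : Int)) 0)
    (fun i => PySem.List.pyGetD answers i 0 =
      PySem.List.pyGetD [2, 1, 2, 3, 2, 4, 2, 5] (PySem.Int.mod i (([2, 1, 2, 3, 2, 4, 2, 5] : List Int).length : Int)) 0)
    (fun i => PySem.List.pyGetD answers i 0 =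
      PySem.List.pyGetD [3, 3, 1, 1, 2, 2, 4, 4, 5, 5] (PySem.Int.mod i (([3, 3, 1, 1, 2, 2, 4, 4, 5, 5] : List Int).length : Int)) 0)]
  simp only [zero_add]
  rw [pvScore_eq answers [1, 2, 3, 4, 5] (by decide) (by decide),
    pvScore_eq answers [2, 1, 2, 3, 2, 4, 2, 5] (by decide) (by decide),
    pvScore_eq answers [3, 3, 1, 1, 2, 2, 4, 4, 5, 5] (by decide) (by decide)]
  rw [sel]
  have hbe : ∀ a b : Int, (a == b) = decide (a = b) := fun a b => rfl
  simp only [hbe]
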